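-- pv_equiv track=rewrite | github.com/YBCS/aoc | aoc2023/day13/day13.py | get_vertical_mirror_point
-- ===== SOURCE A (Python) =====
-- def is_cols_equal(c1, c2, mat):
-- 	for row in range(len(mat)):
-- 		if mat[row][c1] != mat[row][c2]:
-- 			return False
-- 	return True
--
-- def get_vertical_mirror_point(mat): # |
-- 	for col in range(1, len(mat[0])):
-- 		foundOne = True
-- 		for row in range(len(mat)):
-- 			if mat[row][col] != mat[row][col-1]:
-- 				foundOne = False
-- 				break
-- 		if foundOne:
-- 			left = col - 1
-- 			right = len(mat[0]) - col - 1
-- 			span = min(left, right)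
-- 			foundAll = True
-- 			for i in range(span):
-- 				if not is_cols_equal(col-i-2, col+i+1, mat):
-- 					foundAll = False
-- 					break
-- 			if foundAll:
-- 				return col
-- 	return -1
-- ===== SOURCE B (Python) =====
-- def get_vertical_mirror_point(mat):
-- 	w = len(mat[0])
-- 	cand = list(range(1, w))
-- 	for row in mat:
-- 		left = row[:w][::-1]
-- 		cand = [c for c in cand
-- 		        if left[w - c:].startswith(row[c:w]) or row[c:w].startswith(left[w - c:])]
-- 	return cand[0] if cand else -1
-- ===== Notes on version B (the rewrite author's own statement) =====
-- stated objective: alternative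
-- what changed: B traverses row-major: it keeps one list of candidate mirror columns and lets each row filter it with a single reversed-slice startswith test, returning the head of the survivors, instead of A's candidate-major nested char loops with early return and is_cols_equal rescans.
-- outside the precondition, e.g. on get_vertical_mirror_point(['..#', '#.']): A returns -1, B returns 1
import Mathlib
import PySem

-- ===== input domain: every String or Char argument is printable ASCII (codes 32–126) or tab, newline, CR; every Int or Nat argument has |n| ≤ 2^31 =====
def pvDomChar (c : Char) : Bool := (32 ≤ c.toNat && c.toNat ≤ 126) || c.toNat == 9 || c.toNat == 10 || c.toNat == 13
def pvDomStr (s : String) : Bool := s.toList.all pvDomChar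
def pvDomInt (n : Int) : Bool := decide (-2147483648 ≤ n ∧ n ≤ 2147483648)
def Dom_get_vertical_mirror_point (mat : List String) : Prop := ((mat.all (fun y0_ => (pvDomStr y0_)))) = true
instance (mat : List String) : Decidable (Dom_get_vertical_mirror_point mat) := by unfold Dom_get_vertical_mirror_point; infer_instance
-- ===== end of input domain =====

-- B scans row-major: each row filters a shared candidate list with one reversed-slice startswith
-- test, and the head of the surviving list is the answer — a different decomposition from A's
-- candidate-major nested char loops with early return; not claimed faster.

-- ===== PORT A =====
-- mat[row][col] with defaults; on every input admitted by Pre_ all indices are in range, so the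
-- defaults are never read there.
def pvCharAt (mat : List String) (r c : Int) : Char :=
  PySem.List.pyGetD (PySem.List.pyGetD mat r "").toList c ' '

def is_cols_equal (c1 c2 : Int) (mat : List String) : Bool :=
  (PySem.List.pyRange 0 (PySem.List.len mat)).all
    (fun row => pvCharAt mat row c1 == pvCharAt mat row c2)

def pvLoopA (mat : List String) (w : Int) : List Int → Int
  | [] => -1
  | col :: rest =>
    let foundOne := (PySem.List.pyRange 0 (PySem.List.len mat)).all
      (fun row => pvCharAt mat row col == pvCharAt mat row (col - 1))
    if foundOne then
      let left := col - 1
      let right := w - col - 1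
      let span := min left right
      let foundAll := (PySem.List.pyRange 0 span).all
        (fun i => is_cols_equal (col - i - 2) (col + i + 1) mat)
      if foundAll then col else pvLoopA mat w rest
    else pvLoopA mat w rest

def get_vertical_mirror_point (mat : List String) : Int :=
  let w := PySem.Str.len (PySem.List.pyGetD mat 0 "")
  pvLoopA mat w (PySem.List.pyRange 1 w)

-- ===== PORT B =====
-- keep c iff left[w-c:].startswith(row[c:w]) or row[c:w].startswith(left[w-c:]),
-- left = row[:w][::-1]  ([::-1] is reverse: PySem.List.slice?_none_none_neg_one)
def pvKeep (w : Int) (row : String) (c : Int) : Bool :=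
  let left := (PySem.List.slice row.toList none (some w)).reverse
  let l := PySem.List.slice left (some (w - c)) none
  let r := PySem.List.slice row.toList (some c) (some w)
  PySem.Chars.startswith l r || PySem.Chars.startswith r l

def get_vertical_mirror_point_alt (mat : List String) : Int :=
  let w := PySem.Str.len (PySem.List.pyGetD mat 0 "")
  let cand := mat.foldl (fun cand row => cand.filter (fun c => pvKeep w row c))
      (PySem.List.pyRange 1 w)
  match cand with
  | [] => -1
  | c :: _ => c

-- ===== PRECONDITION & SPEC =====
-- Pre_ excludes the empty matrix, on which A raises IndexError (mat[0]), and matrices with a row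
-- shorter than the first row, on which A usually raises IndexError and otherwise returns -1 only
-- because an earlier mismatch happens to break the scan before the missing index is read.
def Pre_get_vertical_mirror_point (mat : List String) : Prop :=
  mat ≠ [] ∧ ∀ s ∈ mat, PySem.Str.len (PySem.List.pyGetD mat 0 "") ≤ PySem.Str.len s
instance (mat : List String) : Decidable (Pre_get_vertical_mirror_point mat) := by
  unfold Pre_get_vertical_mirror_point; infer_instance

def pvWitness_get_vertical_mirror_point : List String := ["#..#", ".##."]

def Spec_get_vertical_mirror_point (mat : List String) (out : Int) : Prop := out = get_vertical_mirror_point_alt mat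
instance (mat : List String) (out : Int) : Decidable (Spec_get_vertical_mirror_point mat out) := by unfold Spec_get_vertical_mirror_point; infer_instance

-- ===== CLAIM (what is proved, stated in full; the proofs are below) =====
def Claim_equal_get_vertical_mirror_point : Prop := ∀ (mat : List String), Dom_get_vertical_mirror_point mat → Pre_get_vertical_mirror_point mat → Spec_get_vertical_mirror_point mat (get_vertical_mirror_point mat)

-- ===== LEMMAS AND PROOFS =====

-- column c of the matrix, as a list of chars (proof-only notion)
def pvCol (mat : List String) (j : Int) : List Char :=
  mat.map (fun row => PySem.List.pyGetD row.toList j ' ')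

-- the mirror property at boundary c, stated once for both programs
def pvMir (mat : List String) (w c : Int) : Prop :=
  ∀ i : Int, 0 ≤ i → i < min c (w - c) → pvCol mat (c - 1 - i) = pvCol mat (c + i)

theorem pv_col_ext (mat : List String) (a b : Int) :
    pvCol mat a = pvCol mat b
      ↔ ∀ s ∈ mat, PySem.List.pyGetD s.toList a ' ' = PySem.List.pyGetD s.toList b ' ' := by
  simp [pvCol, List.map_inj_left]

-- a row-wise all over range(len(mat)) is an all over mat itself
theorem pv_all_pyRange_getD (mat : List String) (F : String → Bool) :
    (PySem.List.pyRange 0 (PySem.List.len mat)).all (fun j => F (PySem.List.pyGetD mat j "")) = mat.all F := by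
  conv_rhs => rw [← PySem.List.map_pyGetD_pyRange_zero mat ""]
  rw [List.all_map]
  rfl

-- char-by-char equality of two columns over all rows IS equality of the column tuples
theorem pv_rows_all_iff (mat : List String) (a b : Int) :
    ((PySem.List.pyRange 0 (PySem.List.len mat)).all
        (fun row => pvCharAt mat row a == pvCharAt mat row b) = true)
      ↔ pvCol mat a = pvCol mat b := by
  simp only [pvCharAt]
  rw [pv_all_pyRange_getD mat
      (fun row => PySem.List.pyGetD row.toList a ' ' == PySem.List.pyGetD row.toList b ' ')]
  simp [pvCol, List.all_eq_true, List.map_inj_left]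

theorem pv_is_cols_equal_iff (c1 c2 : Int) (mat : List String) :
    (is_cols_equal c1 c2 mat = true) ↔ pvCol mat c1 = pvCol mat c2 := by
  unfold is_cols_equal
  exact pv_rows_all_iff mat c1 c2

-- A's span test at col, propositionally
theorem pv_condA_iff (mat : List String) (s col : Int) :
    ((PySem.List.pyRange 0 s).all
        (fun i => is_cols_equal (col - i - 2) (col + i + 1) mat) = true)
      ↔ ∀ i : Int, 0 ≤ i → i < s → pvCol mat (col - i - 2) = pvCol mat (col + i + 1) := by
  rw [List.all_eq_true]
  constructor
  · intro h i h0 h1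
    exact (pv_is_cols_equal_iff _ _ mat).1 (h i ((PySem.List.mem_pyRange_one).2 ⟨h0, h1⟩))
  · intro h i hm
    obtain ⟨h0, h1⟩ := (PySem.List.mem_pyRange_one).1 hm
    exact (pv_is_cols_equal_iff _ _ mat).2 (h i h0 h1)

-- A's adjacent test AND span test together say exactly pvMir
theorem pv_condA_combined_iff (mat : List String) (w col : Int) (h1 : 1 ≤ col) (h2 : col < w) :
    ((((PySem.List.pyRange 0 (PySem.List.len mat)).all
        (fun row => pvCharAt mat row col == pvCharAt mat row (col - 1)))
      && ((PySem.List.pyRange 0 (min (col - 1) (w - col - 1))).all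
        (fun i => is_cols_equal (col - i - 2) (col + i + 1) mat))) = true)
    ↔ pvMir mat w col := by
  rw [Bool.and_eq_true, pv_rows_all_iff, pv_condA_iff]
  unfold pvMir
  constructor
  · rintro ⟨hone, hall⟩ i hi0 hik
    by_cases hz : i = 0
    · subst hz
      simpa using hone.symm
    · have := hall (i - 1) (by omega) (by omega)
      have e1 : col - (i - 1) - 2 = col - 1 - i := by ring
      have e2 : col + (i - 1) + 1 = col + i := by ring
      rw [e1, e2] at this
      exact this
  · intro h
    constructor
    · have := h 0 (by omega) (by omega)
      simpa using this.symm
    · intro i hi0 his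
      have := h (i + 1) (by omega) (by omega)
      have e1 : col - 1 - (i + 1) = col - i - 2 := by ring
      have e2 : col + (i + 1) = col + i + 1 := by ring
      rw [e1, e2] at this
      exact this

-- mutual prefix = agreement on the first min-length characters
theorem pv_prefix_or_iff {α : Type} (a b : List α) :
    (a <+: b ∨ b <+: a) ↔ ∀ i : Nat, i < min a.length b.length → a[i]? = b[i]? := by
  constructor
  · rintro (h | h) i him
    · rw [List.prefix_iff_getElem?] at h
      rw [h i (by omega), List.getElem?_eq_getElem (by omega)]
    · rw [List.prefix_iff_getElem?] at h
      rw [h i (by omega), List.getElem?_eq_getElem (by omega)]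
  · intro h
    rcases le_total a.length b.length with hle | hle
    · left
      have : a = b.take a.length := by
        apply List.ext_getElem?
        intro i
        by_cases hi : i < a.length
        · rw [List.getElem?_take_of_lt hi, h i (by omega)]
        · rw [List.getElem?_eq_none (by omega), List.getElem?_eq_none (by simp; omega)]
      rw [this]; exact List.take_prefix _ _
    · right
      have : b = a.take b.length := by
        apply List.ext_getElem?
        intro i
        by_cases hi : i < b.length
        · rw [List.getElem?_take_of_lt hi, (h i (by omega)).symm]
        · rw [List.getElem?_eq_none (by omega), List.getElem?_eq_none (by simp; omega)]
      rw [this]; exact List.take_prefix _ _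

-- mutual-prefix of reversed-left-part and right-part = the per-row mirror pairs
theorem pv_agree_iff (r : List Char) (n : Nat) (hn : n ≤ r.length) :
    (((r.take n).reverse <+: r.drop n) ∨ (r.drop n <+: (r.take n).reverse))
      ↔ ∀ i : Nat, i < min n (r.length - n) → r[n - 1 - i]? = r[n + i]? := by
  have hlen1 : (r.take n).reverse.length = n := by simp; omega
  have hlen2 : (r.drop n).length = r.length - n := by simp
  rw [pv_prefix_or_iff]
  constructor
  · intro h i hi
    have := h i (by rw [hlen1, hlen2]; omega)
    rw [List.getElem?_reverse (by simp; omega), List.getElem?_take_of_lt (by simp; omega),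
      List.getElem?_drop] at this
    rw [show (r.take n).length - 1 - i = n - 1 - i by simp; omega] at this
    exact this
  · intro h i hi
    rw [hlen1, hlen2] at hi
    have := h i hi
    rw [List.getElem?_reverse (by simp; omega), List.getElem?_take_of_lt (by simp; omega),
      List.getElem?_drop]
    rw [show (r.take n).length - 1 - i = n - 1 - i by simp; omega]
    exact this

-- B's per-row keep test says exactly the per-row mirror condition (row of width w)
theorem pv_keep_iff (w : Int) (row : String) (c : Int)
    (hw : w ≤ (row.toList.length : Int)) (h1 : 1 ≤ c) (h2 : c < w) :
    (pvKeep w row c = true)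
      ↔ ∀ i : Int, 0 ≤ i → i < min c (w - c) →
          PySem.List.pyGetD row.toList (c - 1 - i) ' ' = PySem.List.pyGetD row.toList (c + i) ' ' := by
  simp only [pvKeep]
  rw [PySem.List.slice_to row.toList (show (0:Int) ≤ w by omega),
    PySem.List.slice_from (row.toList.take w.toNat).reverse (show (0:Int) ≤ w - c by omega),
    PySem.List.slice_toNat row.toList (show (0:Int) ≤ c by omega) (show (0:Int) ≤ w by omega)]
  have hrslice : (row.toList.drop c.toNat).take (w.toNat - c.toNat)
      = (row.toList.take w.toNat).drop c.toNat := by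
    rw [List.drop_take]
  have hdropRev : (row.toList.take w.toNat).reverse.drop (w - c).toNat
      = ((row.toList.take w.toNat).take c.toNat).reverse := by
    rw [List.drop_reverse,
      show (row.toList.take w.toNat).length - (w - c).toNat = c.toNat by rw [List.length_take]; omega]
  rw [hrslice, hdropRev]
  simp only [Bool.or_eq_true, PySem.Chars.startswith_iff]
  rw [or_comm, pv_agree_iff (row.toList.take w.toNat) c.toNat (by rw [List.length_take]; omega)]
  have htlen : (row.toList.take w.toNat).length = w.toNat := by rw [List.length_take]; omega
  have htget : ∀ j : Nat, j < w.toNat → (row.toList.take w.toNat)[j]? = row.toList[j]? :=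
    fun j hj => List.getElem?_take_of_lt hj
  constructor
  · intro h i hi0 hik
    have hiN : i.toNat < min c.toNat ((row.toList.take w.toNat).length - c.toNat) := by rw [htlen]; omega
    have := h i.toNat hiN
    rw [htget _ (by omega), htget _ (by omega)] at this
    have hb1 : c.toNat - 1 - i.toNat < row.toList.length := by omega
    have hb2 : c.toNat + i.toNat < row.toList.length := by omega
    rw [List.getElem?_eq_getElem hb1, List.getElem?_eq_getElem hb2] at this
    rw [show c - 1 - i = ((c.toNat - 1 - i.toNat : Nat) : Int) by omega, PySem.List.pyGetD_natCast,
      List.getD_eq_getElem _ _ hb1]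
    rw [show c + i = ((c.toNat + i.toNat : Nat) : Int) by omega, PySem.List.pyGetD_natCast,
      List.getD_eq_getElem _ _ hb2]
    exact Option.some.inj this
  · intro h i hik
    rw [htlen] at hik
    have := h (i : Int) (by omega) (by omega)
    have hb1 : c.toNat - 1 - i < row.toList.length := by omega
    have hb2 : c.toNat + i < row.toList.length := by omega
    rw [show c - 1 - (i : Int) = ((c.toNat - 1 - i : Nat) : Int) by omega, PySem.List.pyGetD_natCast,
      List.getD_eq_getElem _ _ hb1] at this
    rw [show c + (i : Int) = ((c.toNat + i : Nat) : Int) by omega, PySem.List.pyGetD_natCast,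
      List.getD_eq_getElem _ _ hb2] at this
    rw [htget _ (by omega), htget _ (by omega),
      List.getElem?_eq_getElem hb1, List.getElem?_eq_getElem hb2, this]

theorem pv_all_keep_iff (mat : List String) (w c : Int)
    (hw : ∀ s ∈ mat, w ≤ (s.toList.length : Int)) (h1 : 1 ≤ c) (h2 : c < w) :
    (mat.all (fun row => pvKeep w row c) = true) ↔ pvMir mat w c := by
  rw [List.all_eq_true]
  unfold pvMir
  constructor
  · intro h i hi0 hik
    rw [pv_col_ext]
    intro s hs
    exact ((pv_keep_iff w s c (hw s hs) h1 h2).1 (h s hs)) i hi0 hik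
  · intro h s hs
    rw [pv_keep_iff w s c (hw s hs) h1 h2]
    intro i hi0 hik
    exact (pv_col_ext mat _ _).1 (h i hi0 hik) s hs

-- folding the per-row filters over the rows is one filter by the all-rows test
theorem pv_fold_filter (mat : List String) (w : Int) (init : List Int) :
    mat.foldl (fun cand row => cand.filter (fun c => pvKeep w row c)) init
      = init.filter (fun c => mat.all (fun row => pvKeep w row c)) := by
  induction mat generalizing init with
  | nil => simp
  | cons row rest ih =>
    simp only [List.foldl_cons, ih, List.filter_filter, List.all_cons]
    exact List.filter_congr (fun c _ => by rw [Bool.and_comm])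

-- A's early-return loop is head-or-(-1) of the filtered candidate list
theorem pv_loopA_eq_filter (mat : List String) (w : Int) (l : List Int)
    (hw : ∀ s ∈ mat, w ≤ (s.toList.length : Int))
    (hl : ∀ c ∈ l, 1 ≤ c ∧ c < w) :
    pvLoopA mat w l
      = (match l.filter (fun c => mat.all (fun row => pvKeep w row c)) with
         | [] => -1
         | c :: _ => c) := by
  induction l with
  | nil => rfl
  | cons col rest ih =>
    obtain ⟨h1, h2⟩ := hl col (List.mem_cons_self ..)
    have hrest : ∀ c ∈ rest, 1 ≤ c ∧ c < w := fun c hc => hl c (List.mem_cons_of_mem _ hc)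
    have hq : (((PySem.List.pyRange 0 (PySem.List.len mat)).all
        (fun row => pvCharAt mat row col == pvCharAt mat row (col - 1)))
      && ((PySem.List.pyRange 0 (min (col - 1) (w - col - 1))).all
        (fun i => is_cols_equal (col - i - 2) (col + i + 1) mat)))
        = mat.all (fun row => pvKeep w row col) := by
      rw [Bool.eq_iff_iff, pv_condA_combined_iff mat w col h1 h2,
        pv_all_keep_iff mat w col hw h1 h2]
    rw [pvLoopA, List.filter_cons]
    rw [← hq]
    cases hone : (PySem.List.pyRange 0 (PySem.List.len mat)).all
        (fun row => pvCharAt mat row col == pvCharAt mat row (col - 1)) <;>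
      cases hall : (PySem.List.pyRange 0 (min (col - 1) (w - col - 1))).all
        (fun i => is_cols_equal (col - i - 2) (col + i + 1) mat) <;>
      simp [*, ih hrest]

-- ===== VERDICT (by name: the statement is the Claim_ definition above) =====
theorem get_vertical_mirror_point_spec : Claim_equal_get_vertical_mirror_point := by
  intro mat _ hpre
  obtain ⟨hne, hlen⟩ := hpre
  unfold Spec_get_vertical_mirror_point
  simp only [get_vertical_mirror_point, get_vertical_mirror_point_alt]
  rw [pv_fold_filter]
  apply pv_loopA_eq_filter
  · intro s hs
    have := hlen s hs
    simpa [PySem.Str.len_eq] using this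
  · intro c hc
    obtain ⟨ha, hb⟩ := (PySem.List.mem_pyRange_one).1 hc
    exact ⟨ha, hb⟩
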